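-- pv_equiv track=rewrite | github.com/recursionBlack/leetcodePython | Greedy/maxTwo01SameSubArray.py | maxTwo01SameSubArray
-- ===== SOURCE A (Python) =====
-- from typing import List
--
-- def maxTwo01SameSubArray(arr: List[int]) -> int:
--     leftZero, rightZero = -1, -1
--     leftOne, rightOne = -1, -1
--     n = len(arr)
--     for i in range(n):
--         if arr[i] == 0:
--             leftZero = i
--             break
--     for i in range(n):
--         if arr[i] == 1:
--             leftOne = i
--             break
--     for i in range(n-1, -1, -1):
--         if arr[i] == 0:
--             rightZero = i
--             break
--     for i in range(n - 1, -1, -1):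
--         if arr[i] == 1:
--             rightOne = i
--             break
--
--     ans0 = rightZero - leftZero
--     ans1 = rightOne - leftOne
--
--     return max(ans0, ans1)
-- ===== SOURCE B (Python) =====
-- from typing import List
--
-- def maxTwo01SameSubArray(arr: List[int]) -> int:
--     first0 = last0 = first1 = last1 = -1
--     for i, x in enumerate(arr):
--         if x == 0:
--             if first0 == -1:
--                 first0 = i
--             last0 = i
--         elif x == 1:
--             if first1 == -1:
--                 first1 = i
--             last1 = i
--     return max(last0 - first0, last1 - first1)
-- ===== Notes on version B (the rewrite author's own statement) =====
-- stated objective: alternative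
-- what changed: Replaces A's four separate scan-with-break loops (two forward, two backward) by a single forward pass that accumulates first/last indices of 0 and 1 in four variables.
import Mathlib
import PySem

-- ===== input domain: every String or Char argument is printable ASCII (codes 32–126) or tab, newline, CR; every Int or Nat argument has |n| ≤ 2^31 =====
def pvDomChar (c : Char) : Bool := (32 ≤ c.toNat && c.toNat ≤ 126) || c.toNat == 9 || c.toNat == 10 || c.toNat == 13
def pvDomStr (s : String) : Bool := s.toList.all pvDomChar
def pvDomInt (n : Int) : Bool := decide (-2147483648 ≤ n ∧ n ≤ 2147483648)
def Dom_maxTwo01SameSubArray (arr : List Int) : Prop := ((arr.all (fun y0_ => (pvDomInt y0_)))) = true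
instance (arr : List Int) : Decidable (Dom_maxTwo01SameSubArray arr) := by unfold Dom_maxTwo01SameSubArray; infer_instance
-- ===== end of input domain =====

-- B replaces A's four scan-with-break loops by one forward pass accumulating first/last indices (alternative decomposition, same O(n) cost).


-- ===== PORT A =====
-- 'for i in range(n): if arr[i] == v: left = i; break' — the loop walks the
-- elements in order carrying the current index i; first hit returns i, falling
-- off the end leaves the sentinel -1.  Exact transcription of the forward loops.
def pvFwdScan (v : Int) : List Int → Int → Int
  | [], _ => -1
  | x :: xs, i => if x = v then i else pvFwdScan v xs (i + 1)

-- 'for i in range(n-1, -1, -1): if arr[i] == v: right = i; break' — the loop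
-- visits arr[n-1], arr[n-2], …, i.e. the elements of arr.reverse in order,
-- with the index counting DOWN from n-1; first hit returns i, else -1.
def pvBwdScan (v : Int) : List Int → Int → Int
  | [], _ => -1
  | x :: xs, i => if x = v then i else pvBwdScan v xs (i - 1)

def maxTwo01SameSubArray (arr : List Int) : Int :=
  let n : Int := arr.length
  let leftZero := pvFwdScan 0 arr 0
  let leftOne := pvFwdScan 1 arr 0
  let rightZero := pvBwdScan 0 arr.reverse (n - 1)
  let rightOne := pvBwdScan 1 arr.reverse (n - 1)
  let ans0 := rightZero - leftZero
  let ans1 := rightOne - leftOne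
  max ans0 ans1

-- ===== PORT B =====
-- one loop body of Source B: state (first0, last0, first1, last1), input (i, x)
def pvAltStep (s : Int × Int × Int × Int) (p : Int × Int) : Int × Int × Int × Int :=
  let (f0, l0, f1, l1) := s
  let (i, x) := p
  if x = 0 then ((if f0 = -1 then i else f0), i, f1, l1)
  else if x = 1 then (f0, l0, (if f1 = -1 then i else f1), i)
  else s

def maxTwo01SameSubArray_alt (arr : List Int) : Int :=
  let s := (PySem.List.enumerate arr).foldl pvAltStep (-1, -1, -1, -1)
  max (s.2.1 - s.1) (s.2.2.2 - s.2.2.1)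

-- ===== PRECONDITION & SPEC =====
def Spec_maxTwo01SameSubArray (arr : List Int) (out : Int) : Prop := out = maxTwo01SameSubArray_alt arr
instance (arr : List Int) (out : Int) : Decidable (Spec_maxTwo01SameSubArray arr out) := by unfold Spec_maxTwo01SameSubArray; infer_instance

-- ===== CLAIM (what is proved, stated in full; the proofs are below) =====
def Claim_equal_maxTwo01SameSubArray : Prop := ∀ (arr : List Int), Dom_maxTwo01SameSubArray arr → Spec_maxTwo01SameSubArray arr (maxTwo01SameSubArray arr)

-- ===== LEMMAS AND PROOFS =====

-- accumulator form of "index of the last occurrence of v, offset k, default d"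
def pvLastAcc (v : Int) : List Int → Int → Int → Int
  | [], _, d => d
  | x :: xs, k, d => pvLastAcc v xs (k + 1) (if x = v then k else d)

theorem pvLastAcc_not_mem (v : Int) (xs : List Int) (hk : v ∉ xs) :
    ∀ (k d : Int), pvLastAcc v xs k d = d := by
  induction xs with
  | nil => intro k d; rfl
  | cons x xs ih =>
    intro k d
    simp only [List.mem_cons, not_or] at hk
    simp [pvLastAcc, Ne.symm hk.1, ih hk.2]

theorem pvLastAcc_mem (v : Int) (xs : List Int) (hv : v ∈ xs) :
    ∀ (k d d' : Int), pvLastAcc v xs k d = pvLastAcc v xs k d' := by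
  induction xs with
  | nil => cases hv
  | cons x xs ih =>
    intro k d d'
    by_cases hx : x = v
    · simp [pvLastAcc, hx]
    · have hm : v ∈ xs := by
        rcases List.mem_cons.mp hv with h | h
        · exact absurd h.symm hx
        · exact h
      simp only [pvLastAcc, if_neg hx]
      exact ih hm _ _ _

theorem pvBwdScan_snoc (v x : Int) (ys : List Int) :
    ∀ (i : Int), pvBwdScan v (ys ++ [x]) i =
      if v ∈ ys then pvBwdScan v ys i
      else if x = v then i - ys.length else -1 := by
  induction ys with
  | nil => intro i; simp [pvBwdScan]
  | cons y ys ih =>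
    intro i
    by_cases hy : y = v
    · simp [pvBwdScan, hy]
    · have : (v ∈ y :: ys) ↔ (v ∈ ys) := by
        simp [List.mem_cons, Ne.symm hy]
      by_cases hm : v ∈ ys
      · simp [pvBwdScan, hy, ih, hm]
      · simp only [List.cons_append, pvBwdScan, if_neg hy, ih , this, hm, if_false]
        split_ifs with hx
        · simp only [List.length_cons]; push_cast; ring
        · rfl

-- the backward scan over the reversed list computes the last-occurrence accumulator
theorem pvBwdScan_eq_lastAcc (v : Int) (xs : List Int) :
    ∀ (k : Int), pvBwdScan v xs.reverse (k + xs.length - 1) = pvLastAcc v xs k (-1) := by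
  induction xs with
  | nil => intro k; rfl
  | cons x xs ih =>
    intro k
    have hrev : (x :: xs).reverse = xs.reverse ++ [x] := by simp
    rw [hrev, pvBwdScan_snoc]
    have hlen : ((List.length (x :: xs) : Int)) = (xs.length : Int) + 1 := by simp only [List.length_cons]; push_cast; ring
    by_cases hm : v ∈ xs
    · have : v ∈ xs.reverse := by simpa using hm
      rw [if_pos this]
      have hidx : k + ((x :: xs).length : Int) - 1 = (k + 1) + (xs.length : Int) - 1 := by
        rw [hlen]; ring
      rw [hidx, ih (k + 1)]
      simp only [pvLastAcc]
      exact pvLastAcc_mem v xs hm (k + 1) (-1) _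
    · have : v ∉ xs.reverse := by simpa using hm
      rw [if_neg this]
      simp only [pvLastAcc]
      rw [pvLastAcc_not_mem v xs hm, List.length_reverse]
      split_ifs with hx
      · rw [hlen]; ring
      · rfl

-- invariant of Source B's single pass, over an enumeration starting at index k ≥ 0
theorem pvAlt_fold_inv (xs : List Int) :
    ∀ (k : Int), 0 ≤ k → ∀ (f0 l0 f1 l1 : Int),
      (PySem.List.enumerate xs k).foldl pvAltStep (f0, l0, f1, l1) =
        ((if f0 = -1 then pvFwdScan 0 xs k else f0), pvLastAcc 0 xs k l0,
         (if f1 = -1 then pvFwdScan 1 xs k else f1), pvLastAcc 1 xs k l1) := by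
  induction xs with
  | nil =>
    intro k hk f0 l0 f1 l1
    simp [PySem.List.enumerate_nil, pvFwdScan, pvLastAcc]
  | cons x xs ih =>
    intro k hk f0 l0 f1 l1
    have hk1 : 0 ≤ k + 1 := by omega
    have hkne : k ≠ -1 := by omega
    rw [PySem.List.enumerate_cons, List.foldl_cons]
    by_cases hx0 : x = 0
    · by_cases hf : f0 = -1
      · simp [pvAltStep, hx0, hf, ih (k + 1) hk1, pvFwdScan, pvLastAcc, hkne]
      · simp [pvAltStep, hx0, hf, ih (k + 1) hk1, pvFwdScan, pvLastAcc]
    · by_cases hx1 : x = 1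
      · by_cases hf : f1 = -1
        · simp [pvAltStep, hx1, hf, ih (k + 1) hk1, pvFwdScan, pvLastAcc, hkne]
        · simp [pvAltStep, hx1, hf, ih (k + 1) hk1, pvFwdScan, pvLastAcc]
      · simp [pvAltStep, hx0, hx1, ih (k + 1) hk1, pvFwdScan, pvLastAcc]

-- ===== VERDICT (by name: the statement is the Claim_ definition above) =====
theorem maxTwo01SameSubArray_spec : Claim_equal_maxTwo01SameSubArray := by
  intro arr _
  unfold Spec_maxTwo01SameSubArray maxTwo01SameSubArray maxTwo01SameSubArray_alt
  rw [pvAlt_fold_inv arr 0 le_rfl]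
  have h0 : pvBwdScan 0 arr.reverse ((arr.length : Int) - 1) = pvLastAcc 0 arr 0 (-1) := by
    have := pvBwdScan_eq_lastAcc 0 arr 0
    simpa using this
  have h1 : pvBwdScan 1 arr.reverse ((arr.length : Int) - 1) = pvLastAcc 1 arr 0 (-1) := by
    have := pvBwdScan_eq_lastAcc 1 arr 0
    simpa using this
  simp [h0, h1]
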